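-- pv_equiv track=rewrite | github.com/juanquy/RenoiseAI | ai_server/midi_composer.py | gen_clap
-- ===== SOURCE A (Python) =====
-- def gen_clap(lines, lpb, pattern_id="clap"):
--     """Clap on beats 2 and 4, slightly offset from snare."""
--     events = []
--     bar = lpb * 4
--     offset = max(1, lpb // 4)
--     for bar_start in range(0, lines, bar):
--         for beat in [1, 3]:
--             l = bar_start + beat * lpb + offset
--             if l < lines:
--                 events.append((l, "C#4"))  # GM Clap (Octave 4)
--     return events
-- ===== SOURCE B (Python) =====
-- def gen_clap(lines, lpb, pattern_id="clap"):
--     """Clap on beats 2 and 4, slightly offset from snare."""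
--     offset = max(1, lpb // 4)
--     return [(l, "C#4") for l in range(lpb + offset, lines, 2 * lpb)]
-- ===== Notes on version B (the rewrite author's own statement) =====
-- stated objective: simpler
-- what changed: Replaces the nested bar/beat loops with a single arithmetic progression: the emitted lines are exactly offset+lpb, offset+3*lpb, ... below lines, so B is one range(lpb+offset, lines, 2*lpb) comprehension.
-- outside the precondition, e.g. on gen_clap(-4, -2, 'clap'): A returns [(-5, 'C#4')], B returns [(-1, 'C#4')]
import Mathlib
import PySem

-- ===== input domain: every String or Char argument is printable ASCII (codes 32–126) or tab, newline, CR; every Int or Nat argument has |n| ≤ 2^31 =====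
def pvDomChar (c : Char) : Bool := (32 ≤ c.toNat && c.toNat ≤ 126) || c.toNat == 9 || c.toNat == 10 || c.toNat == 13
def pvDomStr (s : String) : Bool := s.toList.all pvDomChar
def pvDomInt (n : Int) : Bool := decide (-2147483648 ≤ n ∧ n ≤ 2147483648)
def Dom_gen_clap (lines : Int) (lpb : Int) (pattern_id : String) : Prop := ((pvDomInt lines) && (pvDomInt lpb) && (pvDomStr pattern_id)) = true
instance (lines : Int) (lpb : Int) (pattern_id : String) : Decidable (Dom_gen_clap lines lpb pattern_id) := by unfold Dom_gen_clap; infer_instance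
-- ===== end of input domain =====

-- B replaces A's nested bar/beat loops by one arithmetic-progression range (simpler decomposition, same cost).

-- ===== PORT A =====
def gen_clap (lines : Int) (lpb : Int) (pattern_id : String) : List (Int × String) :=
  let bar := lpb * 4
  let offset := max 1 (PySem.Int.floordiv lpb 4)
  (PySem.List.pyRange 0 lines bar).foldl
    (fun events bar_start =>
      ([1, 3] : List Int).foldl
        (fun events beat =>
          let l := bar_start + beat * lpb + offset
          if l < lines then events ++ [(l, "C#4")] else events)
        events)
    []

-- ===== PORT B =====
def gen_clap_alt (lines : Int) (lpb : Int) (pattern_id : String) : List (Int × String) :=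
  let offset := max 1 (PySem.Int.floordiv lpb 4)
  (PySem.List.pyRange (lpb + offset) lines (2 * lpb)).map (fun l => (l, "C#4"))

-- ===== PRECONDITION & SPEC =====
-- Pre_ excludes lpb = 0, where A (and B) raise ValueError from range's zero step, and the
-- out-of-natural-domain corner lpb < 0 ∧ lines < 0 (negative lines-per-beat together with a
-- negative pattern length), where A's nonempty output has no musical meaning.
def Pre_gen_clap (lines : Int) (lpb : Int) (pattern_id : String) : Prop :=
  lpb ≠ 0 ∧ (0 < lpb ∨ 0 ≤ lines)
instance (lines : Int) (lpb : Int) (pattern_id : String) : Decidable (Pre_gen_clap lines lpb pattern_id) := by unfold Pre_gen_clap; infer_instance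
def pvWitness_gen_clap : Int × Int × String := (16, 4, "clap")

def Spec_gen_clap (lines : Int) (lpb : Int) (pattern_id : String) (out : List (Int × String)) : Prop := out = gen_clap_alt lines lpb pattern_id
instance (lines : Int) (lpb : Int) (pattern_id : String) (out : List (Int × String)) : Decidable (Spec_gen_clap lines lpb pattern_id out) := by unfold Spec_gen_clap; infer_instance

-- ===== CLAIM (what is proved, stated in full; the proofs are below) =====
def Claim_equal_gen_clap : Prop := ∀ (lines : Int) (lpb : Int) (pattern_id : String), Dom_gen_clap lines lpb pattern_id → Pre_gen_clap lines lpb pattern_id → Spec_gen_clap lines lpb pattern_id (gen_clap lines lpb pattern_id)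

-- ===== LEMMAS AND PROOFS =====

-- range with positive step: empty and cons characterisations
theorem pyRange_pos_nil (a b s : Int) (hs : 0 < s) (h : b ≤ a) :
    PySem.List.pyRange a b s = [] := by
  simp [PySem.List.pyRange, hs, hs.ne', not_lt.mpr h]

theorem pyRange_neg_nil (a b s : Int) (hs : s < 0) (h : a ≤ b) :
    PySem.List.pyRange a b s = [] := by
  simp [PySem.List.pyRange, hs.ne, not_lt.mpr hs.le, not_lt.mpr h]

theorem pyRange_pos_cons (a b s : Int) (hs : 0 < s) (h : a < b) :
    PySem.List.pyRange a b s = a :: PySem.List.pyRange (a + s) b s := by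
  rw [PySem.List.pyRange_of_pos a b hs, PySem.List.pyRange_of_pos (a + s) b hs]
  rw [if_pos h]
  have key : ((b - a + s - 1) / s).toNat
      = (if a + s < b then ((b - (a + s) + s - 1) / s).toNat else 0) + 1 := by
    by_cases h2 : a + s < b
    · rw [if_pos h2]
      have : b - a + s - 1 = (b - (a + s) + s - 1) + 1 * s := by ring
      rw [this, Int.add_mul_ediv_right _ _ hs.ne']
      have hnn : 0 ≤ b - (a + s) + s - 1 := by omega
      have := Int.ediv_nonneg hnn hs.le
      omega
    · rw [if_neg h2]
      have h1 : 1 * s ≤ b - a + s - 1 := by omega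
      have h2' : b - a + s - 1 < 2 * s := by omega
      have hlo : 1 ≤ (b - a + s - 1) / s := by
        have := Int.le_ediv_iff_mul_le hs (a := 1) (b := b - a + s - 1)
        exact this.mpr h1
      have hhi : (b - a + s - 1) / s < 2 := by
        have := Int.ediv_lt_iff_lt_mul hs (a := b - a + s - 1) (b := 2)
        exact this.mpr h2'
      omega
  rw [key, List.range_succ_eq_map, List.map_cons, List.map_map]
  refine List.cons_eq_cons.mpr ⟨by push_cast; ring, ?_⟩
  apply List.map_congr_left
  intro k _
  simp only [Function.comp_apply]
  push_cast
  ring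

-- A's bar/beat double loop, started at any bar position b, produces exactly the
-- arithmetic progression b + lpb + off, b + 3*lpb + off, … below `lines`.
theorem clap_key (lines lpb off : Int) (hl : 1 ≤ lpb) (ho : 1 ≤ off) :
    ∀ b (acc : List (Int × String)),
      (PySem.List.pyRange b lines (lpb * 4)).foldl
        (fun events bar_start =>
          ([1, 3] : List Int).foldl
            (fun events beat =>
              if bar_start + beat * lpb + off < lines
              then events ++ [(bar_start + beat * lpb + off, "C#4")] else events)
            events)
        acc
      = acc ++ (PySem.List.pyRange (b + lpb + off) lines (2 * lpb)).map (fun l => (l, "C#4")) := by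
  suffices H : ∀ n : ℕ, ∀ b : Int, (lines - b).toNat = n → ∀ acc : List (Int × String),
      (PySem.List.pyRange b lines (lpb * 4)).foldl
        (fun events bar_start =>
          ([1, 3] : List Int).foldl
            (fun events beat =>
              if bar_start + beat * lpb + off < lines
              then events ++ [(bar_start + beat * lpb + off, "C#4")] else events)
            events)
        acc
      = acc ++ (PySem.List.pyRange (b + lpb + off) lines (2 * lpb)).map (fun l => (l, "C#4")) by
    intro b acc
    exact H _ b rfl acc
  intro n
  induction n using Nat.strong_induction_on with
  | _ n ih =>
    intro b hn acc
    by_cases hb : b < lines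
    · have hbar : (0 : Int) < lpb * 4 := by positivity
      rw [pyRange_pos_cons b lines (lpb * 4) hbar hb, List.foldl_cons]
      have hdec : (lines - (b + lpb * 4)).toNat < n := by omega
      rw [ih _ hdec (b + lpb * 4) rfl]
      simp only [List.foldl_cons, List.foldl_nil, one_mul]
      by_cases h1 : b + lpb + off < lines
      · rw [pyRange_pos_cons _ lines (2 * lpb) (by positivity) h1, if_pos h1]
        by_cases h2 : b + 3 * lpb + off < lines
        · rw [if_pos h2,
            pyRange_pos_cons _ lines (2 * lpb) (by positivity) (by omega : b + lpb + off + 2 * lpb < lines)]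
          have e1 : b + lpb + off + 2 * lpb + 2 * lpb = b + lpb * 4 + lpb + off := by ring
          have e2 : b + lpb + off + 2 * lpb = b + 3 * lpb + off := by ring
          rw [e1, e2]
          simp
        · rw [if_neg h2,
            pyRange_pos_nil _ lines (2 * lpb) (by positivity) (by omega : lines ≤ b + lpb + off + 2 * lpb),
            pyRange_pos_nil _ lines (2 * lpb) (by positivity) (by omega : lines ≤ b + lpb * 4 + lpb + off)]
          simp
      · rw [if_neg h1, if_neg (by omega : ¬ b + 3 * lpb + off < lines)]
        rw [pyRange_pos_nil (b + lpb + off) lines (2 * lpb) (by positivity) (by omega)]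
        rw [pyRange_pos_nil (b + lpb * 4 + lpb + off) lines (2 * lpb) (by positivity) (by omega)]
    · rw [pyRange_pos_nil b lines (lpb * 4) (by positivity) (by omega),
        pyRange_pos_nil _ lines (2 * lpb) (by positivity) (by omega : lines ≤ b + lpb + off)]
      simp

-- ===== VERDICT (by name: the statement is the Claim_ definition above) =====
theorem gen_clap_spec : Claim_equal_gen_clap := by
  intro lines lpb pattern_id _ hpre
  obtain ⟨hne, hcase⟩ := hpre
  unfold Spec_gen_clap gen_clap gen_clap_alt
  rcases lt_trichotomy lpb 0 with hneg | hz | hpos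
  · -- lpb < 0 (so lines ≥ 0): both ranges are empty
    have hlines : 0 ≤ lines := by
      cases hcase with
      | inl h => omega
      | inr h => exact h
    have hoff : max 1 (PySem.Int.floordiv lpb 4) = 1 := by
      have : PySem.Int.floordiv lpb 4 ≤ -1 := by
        unfold PySem.Int.floordiv
        rw [Int.fdiv_eq_ediv_of_nonneg _ (by norm_num)]
        have : lpb / 4 ≤ (-1 : Int) / 4 := Int.ediv_le_ediv (by norm_num) (by omega)
        omega
      omega
    simp only [hoff]
    rw [pyRange_neg_nil 0 lines (lpb * 4) (by omega) hlines,
      pyRange_neg_nil (lpb + 1) lines (2 * lpb) (by omega) (by omega)]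
    simp
  · exact absurd hz hne
  · -- lpb > 0: the nested loop equals the single progression
    have ho : 1 ≤ max 1 (PySem.Int.floordiv lpb 4) := le_max_left _ _
    have := clap_key lines lpb (max 1 (PySem.Int.floordiv lpb 4)) (by omega) ho 0 []
    simpa using this
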